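-- pv_equiv track=rewrite | github.com/ipanagiotopoulos/cryptography_engineering1 | pa1.py | Matrix_8x4
-- ===== SOURCE A (Python) =====
-- def Matrix_8x4(x):
--     Hexchar=x
--     HexLIST=[]
--
--     hxarray=[[0,0,0,0],[0,0,0,1],[0,0,1,0],[0,0,1,1],[0,1,0,0],[0,1,0,1],[0,1,1,0],[0,1,1,1],
--            [1,0,0,0],[1,0,0,1],[1,0,1,0],[1,0,1,1],[1,1,0,0],[1,1,0,1],[1,1,1,0],[1,1,1,1], [0,0,0,1],[0,0,1,0]]
--     for i in Hexchar:
--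
--         row = hxarray[int(i,16)]
--         HexLIST.append(row)
--
--     return HexLIST
-- ===== SOURCE B (Python) =====
-- def Matrix_8x4(x):
--     # Stage 1: fold the whole string into one big integer (base-16 Horner).
--     # Stage 2: peel 4-bit nibbles off its low end back-to-front and reverse.
--     n = 0
--     for c in x:
--         n = 16 * n + int(c, 16)
--     out = []
--     for _ in x:
--         v = n & 15
--         out.append([v >> 3 & 1, v >> 2 & 1, v >> 1 & 1, v & 1])
--         n >>= 4
--     out.reverse()
--     return out
-- ===== Notes on version B (the rewrite author's own statement) =====
-- stated objective: alternative
-- what changed: B is a two-stage computation with no lookup table: it first folds the whole string into a single big integer (base-16 Horner), then peels 4-bit nibbles off that integer's low end, building the rows back-to-front and reversing at the end.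
import Mathlib
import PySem

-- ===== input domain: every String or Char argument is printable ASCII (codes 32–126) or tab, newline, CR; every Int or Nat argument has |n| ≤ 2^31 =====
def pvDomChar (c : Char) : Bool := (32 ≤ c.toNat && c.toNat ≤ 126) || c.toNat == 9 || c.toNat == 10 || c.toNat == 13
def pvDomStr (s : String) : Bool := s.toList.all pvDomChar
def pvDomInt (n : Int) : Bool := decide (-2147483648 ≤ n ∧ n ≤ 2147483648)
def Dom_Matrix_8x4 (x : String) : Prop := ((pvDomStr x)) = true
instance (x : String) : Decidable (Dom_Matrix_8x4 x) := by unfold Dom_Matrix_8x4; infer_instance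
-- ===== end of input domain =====

-- B folds the string into one big integer and then peels 4-bit nibbles back-to-front, instead of A's per-character table lookup (alternative decomposition; same exact result).

-- ===== PORT A =====
-- hex value of one hex-digit character, as Python's int(c, 16) computes it on the Pre_ domain
def pvHexDigits : List Char := ['0','1','2','3','4','5','6','7','8','9','a','b','c','d','e','f']
def pvHexVal (c : Char) : Nat := List.idxOf c.toLower pvHexDigits

def pvHexTable : List (List Int) :=
  [[0,0,0,0],[0,0,0,1],[0,0,1,0],[0,0,1,1],[0,1,0,0],[0,1,0,1],[0,1,1,0],[0,1,1,1],
   [1,0,0,0],[1,0,0,1],[1,0,1,0],[1,0,1,1],[1,1,0,0],[1,1,0,1],[1,1,1,0],[1,1,1,1],[0,0,0,1],[0,0,1,0]]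

def Matrix_8x4 (x : String) : List (List Int) :=
  x.toList.foldl (fun acc c => acc ++ [pvHexTable.getD (pvHexVal c) []]) []

-- ===== PORT B =====
-- stage 1 of Source B: the base-16 Horner fold over the characters
def pvParseHex (l : List Char) : Nat := l.foldl (fun a c => 16 * a + pvHexVal c) 0

-- the append-then-reverse loop of Source B; cons order here equals Python's append order
def pvPeel : Nat → Nat → List (List Int)
  | 0, _ => []
  | k + 1, n =>
    let v := n &&& 15
    [((v >>> 3) &&& 1 : Nat), ((v >>> 2) &&& 1 : Nat), ((v >>> 1) &&& 1 : Nat), (v &&& 1 : Nat)]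
      :: pvPeel k (n >>> 4)

def Matrix_8x4_alt (x : String) : List (List Int) :=
  (pvPeel x.toList.length (pvParseHex x.toList)).reverse

-- ===== PRECONDITION & SPEC =====
-- Pre_ excludes strings containing a non-hex-digit character, on which A's int(i, 16) (and B's per-character int(c, 16)) raises ValueError.
def Pre_Matrix_8x4 (x : String) : Prop :=
  (x.toList.all (fun c => c ∈ ['0','1','2','3','4','5','6','7','8','9','a','b','c','d','e','f','A','B','C','D','E','F'])) = true
instance (x : String) : Decidable (Pre_Matrix_8x4 x) := by unfold Pre_Matrix_8x4; infer_instance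
def pvWitness_Matrix_8x4 : String := "1aF0"

def Spec_Matrix_8x4 (x : String) (out : List (List Int)) : Prop := out = Matrix_8x4_alt x
instance (x : String) (out : List (List Int)) : Decidable (Spec_Matrix_8x4 x out) := by unfold Spec_Matrix_8x4; infer_instance

-- ===== CLAIM (what is proved, stated in full; the proofs are below) =====
def Claim_equal_Matrix_8x4 : Prop := ∀ (x : String), Dom_Matrix_8x4 x → Pre_Matrix_8x4 x → Spec_Matrix_8x4 x (Matrix_8x4 x)

-- ===== LEMMAS AND PROOFS =====

abbrev pvIsHex (c : Char) : Prop :=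
  c ∈ ['0','1','2','3','4','5','6','7','8','9','a','b','c','d','e','f','A','B','C','D','E','F']

-- A's append-fold is a map
theorem pvFoldl_append_map {α β : Type} (f : α → β) (l : List α) (acc : List β) :
    l.foldl (fun a c => a ++ [f c]) acc = acc ++ l.map f := by
  induction l generalizing acc with
  | nil => simp
  | cons h t ih => simp [List.foldl, ih]

theorem pvHexVal_lt (c : Char) (hc : pvIsHex c) : pvHexVal c < 16 := by
  unfold pvIsHex at hc; fin_cases hc <;> decide

-- on a hex digit, A's table row equals the bit row of its value
theorem pvRow_eq (c : Char) (hc : pvIsHex c) :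
    pvHexTable.getD (pvHexVal c) [] =
      [((pvHexVal c >>> 3) &&& 1 : Nat), ((pvHexVal c >>> 2) &&& 1 : Nat),
       ((pvHexVal c >>> 1) &&& 1 : Nat), ((pvHexVal c) &&& 1 : Nat)] := by
  unfold pvIsHex at hc; fin_cases hc <;> decide

theorem pvParseHex_append (l : List Char) (c : Char) :
    pvParseHex (l ++ [c]) = 16 * pvParseHex l + pvHexVal c := by
  simp [pvParseHex]

theorem pvPeel_snoc (l : List Char) (c : Char) (hc : pvIsHex c) :
    pvPeel (l ++ [c]).length (pvParseHex (l ++ [c])) =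
      pvHexTable.getD (pvHexVal c) [] :: pvPeel l.length (pvParseHex l) := by
  have hv := pvHexVal_lt c hc
  have h1 : (pvParseHex (l ++ [c])) &&& 15 = pvHexVal c := by
    have h := Nat.and_two_pow_sub_one_eq_mod (pvParseHex (l ++ [c])) 4
    norm_num at h
    rw [h, pvParseHex_append]; omega
  have h2 : (pvParseHex (l ++ [c])) >>> 4 = pvParseHex l := by
    rw [Nat.shiftRight_eq_div_pow, pvParseHex_append]
    norm_num; omega
  simp only [List.length_append, List.length_singleton, pvPeel, h1, h2]
  rw [pvRow_eq c hc]
  simp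

theorem pvPeel_eq_map (l : List Char) (h : ∀ c ∈ l, pvIsHex c) :
    pvPeel l.length (pvParseHex l) =
      (l.reverse).map (fun c => pvHexTable.getD (pvHexVal c) []) := by
  induction l using List.reverseRecOn with
  | nil => simp [pvParseHex, pvPeel]
  | append_singleton t c ih =>
    rw [pvPeel_snoc t c (h c (by simp))]
    rw [ih (fun d hd => h d (by simp [hd]))]
    simp

-- ===== VERDICT (by name: the statement is the Claim_ definition above) =====
theorem Matrix_8x4_spec : Claim_equal_Matrix_8x4 := by
  intro x _ hpre
  unfold Spec_Matrix_8x4 Matrix_8x4 Matrix_8x4_alt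
  rw [pvFoldl_append_map, List.nil_append]
  have hhex : ∀ c ∈ x.toList, pvIsHex c := fun c hc =>
    of_decide_eq_true (List.all_eq_true.mp hpre c hc)
  rw [pvPeel_eq_map x.toList hhex]
  simp
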